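-- pv_equiv track=rewrite | github.com/BinbinGood/Algorithms | 中级班/class01/最大边框.py | MaxSide1
-- ===== SOURCE A (Python) =====
-- def MaxSide1(matrix):
--     if len(matrix) == 0 or (len(matrix) != len(matrix[0])):
--         return 0
--     N = len(matrix)
--     maxborder = 1
--     for cow in range(N):  # 遍历行
--         for row in range(N):  # 遍历列
--             for s in range(min(N - cow, N - row), 0, -1):  # 遍历边长
--                 if isOneBorder(matrix, cow, row, s):
--                     maxborder = max(maxborder, s)
--                     break
--     return maxborder
--
-- def isOneBorder(matirx, cow, row, s):
--     for i in range(row, row + s, 1):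
--         if matirx[cow][i] != 1 or matirx[cow + s - 1][i] != 1:
--             return False
--     for j in range(cow, cow + s, 1):
--         if matirx[j][row] != 1 or matirx[j][row + s - 1] != 1:
--             return False
--     return True
-- ===== SOURCE B (Python) =====
-- def MaxSide1(matrix):
--     if len(matrix) == 0 or len(matrix) != len(matrix[0]):
--         return 0
--     N = len(matrix)
--     # dynamic programming: consecutive-ones run lengths to the right / downward
--     right = {}
--     down = {}
--     for i in range(N - 1, -1, -1):
--         for j in range(N - 1, -1, -1):
--             if matrix[i][j] == 1:
--                 right[(i, j)] = right.get((i, j + 1), 0) + 1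
--                 down[(i, j)] = down.get((i + 1, j), 0) + 1
--     best = 1
--     for i in range(N):
--         for j in range(N):
--             for s in range(min(N - i, N - j), 0, -1):
--                 if (s <= right.get((i, j), 0) and s <= right.get((i + s - 1, j), 0)
--                         and s <= down.get((i, j), 0) and s <= down.get((i, j + s - 1), 0)):
--                     best = max(best, s)
--                     break
--     return best
-- ===== Notes on version B (the rewrite author's own statement) =====
-- stated objective: faster
-- what changed: Replaces the O(s) per-(cell,size) border re-scan with precomputed consecutive-ones-right/down run-length tables built in one backward pass, making each border test O(1).
import Mathlib
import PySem

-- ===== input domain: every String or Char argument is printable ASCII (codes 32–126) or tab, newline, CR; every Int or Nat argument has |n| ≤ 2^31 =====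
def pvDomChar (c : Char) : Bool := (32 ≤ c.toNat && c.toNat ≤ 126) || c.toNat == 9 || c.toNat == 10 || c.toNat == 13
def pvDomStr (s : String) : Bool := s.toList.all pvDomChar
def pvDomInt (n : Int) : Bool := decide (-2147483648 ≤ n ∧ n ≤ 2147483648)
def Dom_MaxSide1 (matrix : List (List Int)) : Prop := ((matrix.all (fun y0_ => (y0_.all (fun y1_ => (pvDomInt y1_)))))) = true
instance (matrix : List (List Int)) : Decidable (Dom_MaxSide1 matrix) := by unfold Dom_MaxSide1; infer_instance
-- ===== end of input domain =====

-- B replaces A's O(s) re-scan of every candidate border by consecutive-ones-right/down run-length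
-- tables built in one backward pass, so each border test is O(1) (O(N^4) -> O(N^3); measured faster).

-- ===== PORT A =====
-- matrix[i][j]; indices are always in range on inputs admitted by Pre_
def pvCell (m : List (List Int)) (i j : Int) : Int :=
  PySem.List.pyGetD (PySem.List.pyGetD m i []) j 0

-- 'for s in l: if p(s): acc = max(acc, s); break' — the break loop both Pythons perform per cell
def pvBreakMax (p : Int → Bool) (mb : Int) : List Int → Int
  | [] => mb
  | s :: rest => if p s then max mb s else pvBreakMax p mb rest

def isOneBorder (m : List (List Int)) (cow row s : Int) : Bool :=
  -- each 'if <bad>: return False' loop becomes .all of the negated test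
  ((PySem.List.pyRange row (row + s) 1).all fun i =>
      pvCell m cow i == 1 && pvCell m (cow + s - 1) i == 1) &&
  ((PySem.List.pyRange cow (cow + s) 1).all fun j =>
      pvCell m j row == 1 && pvCell m j (row + s - 1) == 1)

def MaxSide1 (matrix : List (List Int)) : Int :=
  if matrix.length = 0 ∨ matrix.length ≠ (matrix.headD []).length then 0
  else
    let N : Int := matrix.length
    (PySem.List.pyRange 0 N 1).foldl (fun mb cow =>
      (PySem.List.pyRange 0 N 1).foldl (fun mb row =>
        pvBreakMax (isOneBorder matrix cow row) mb
          (PySem.List.pyRange (min (N - cow) (N - row)) 0 (-1))) mb) 1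

-- ===== PORT B =====
-- body of B's table-building loop: right[(i,j)] = right.get((i,j+1),0)+1; down[(i,j)] = down.get((i+1,j),0)+1
def pvTabStep (m : List (List Int))
    (rd : PySem.Dict (Int × Int) Int × PySem.Dict (Int × Int) Int) (i j : Int) :
    PySem.Dict (Int × Int) Int × PySem.Dict (Int × Int) Int :=
  if pvCell m i j = 1 then
    (rd.1.insert (i, j) (rd.1.getD (i, j + 1) 0 + 1),
     rd.2.insert (i, j) (rd.2.getD (i + 1, j) 0 + 1))
  else rd

-- the two dicts (right, down) after the backward double loop
def pvTables (m : List (List Int)) (N : Int) :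
    PySem.Dict (Int × Int) Int × PySem.Dict (Int × Int) Int :=
  (PySem.List.pyRange (N - 1) (-1) (-1)).foldl (fun rd i =>
    (PySem.List.pyRange (N - 1) (-1) (-1)).foldl (fun rd j => pvTabStep m rd i j) rd)
    (PySem.Dict.empty, PySem.Dict.empty)

def MaxSide1_alt (matrix : List (List Int)) : Int :=
  if matrix.length = 0 ∨ matrix.length ≠ (matrix.headD []).length then 0
  else
    let N : Int := matrix.length
    let rd := pvTables matrix N
    (PySem.List.pyRange 0 N 1).foldl (fun best i =>
      (PySem.List.pyRange 0 N 1).foldl (fun best j =>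
        pvBreakMax (fun s =>
            decide (s ≤ rd.1.getD (i, j) 0) && decide (s ≤ rd.1.getD (i + s - 1, j) 0) &&
            decide (s ≤ rd.2.getD (i, j) 0) && decide (s ≤ rd.2.getD (i, j + s - 1) 0))
          best (PySem.List.pyRange (min (N - i) (N - j)) 0 (-1))) best) 1

-- ===== PRECONDITION & SPEC =====
-- Pre_ excludes only the ragged square-looking matrices (first row of length N but some row
-- shorter than N), on which the Python A raises IndexError.
def Pre_MaxSide1 (matrix : List (List Int)) : Prop :=
  matrix = [] ∨ matrix.length ≠ (matrix.headD []).length ∨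
    ∀ row ∈ matrix, matrix.length ≤ row.length
instance (matrix : List (List Int)) : Decidable (Pre_MaxSide1 matrix) := by
  unfold Pre_MaxSide1; infer_instance
def pvWitness_MaxSide1 : List (List Int) := [[1, 0], [1, 1]]

def Spec_MaxSide1 (matrix : List (List Int)) (out : Int) : Prop := out = MaxSide1_alt matrix
instance (matrix : List (List Int)) (out : Int) : Decidable (Spec_MaxSide1 matrix out) := by
  unfold Spec_MaxSide1; infer_instance

-- ===== CLAIM (what is proved, stated in full; the proofs are below) =====
def Claim_equal_MaxSide1 : Prop := ∀ (matrix : List (List Int)), Dom_MaxSide1 matrix → Pre_MaxSide1 matrix → Spec_MaxSide1 matrix (MaxSide1 matrix)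

-- ===== LEMMAS AND PROOFS =====

-- length of the run of consecutive 1s rightwards from (i,j) / downwards, with explicit fuel
def pvRunR (m : List (List Int)) (i : Int) : Nat → Int → Int
  | 0, _ => 0
  | k + 1, j => if pvCell m i j = 1 then pvRunR m i k (j + 1) + 1 else 0

def pvRunD (m : List (List Int)) (j : Int) : Nat → Int → Int
  | 0, _ => 0
  | k + 1, i => if pvCell m i j = 1 then pvRunD m j k (i + 1) + 1 else 0

def pvRR (m : List (List Int)) (N i j : Int) : Int := pvRunR m i (N - j).toNat j
def pvDD (m : List (List Int)) (N i j : Int) : Int := pvRunD m j (N - i).toNat i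

-- table contents midway through the backward build: rows > t done, plus row t columns > u done
def pvSR (m : List (List Int)) (N t u i j : Int) : Int :=
  if (t < i ∨ (i = t ∧ u < j)) ∧ 0 ≤ i ∧ i < N ∧ 0 ≤ j ∧ j < N then pvRR m N i j else 0
def pvSD (m : List (List Int)) (N t u i j : Int) : Int :=
  if (t < i ∨ (i = t ∧ u < j)) ∧ 0 ≤ i ∧ i < N ∧ 0 ≤ j ∧ j < N then pvDD m N i j else 0

def pvInv (m : List (List Int)) (N t u : Int)
    (rd : PySem.Dict (Int × Int) Int × PySem.Dict (Int × Int) Int) : Prop :=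
  ∀ i j, rd.1.getD (i, j) 0 = pvSR m N t u i j ∧ rd.2.getD (i, j) 0 = pvSD m N t u i j

lemma pvRR_unfold (m : List (List Int)) (N i j : Int) (hj : j < N) :
    pvRR m N i j = if pvCell m i j = 1 then pvRR m N i (j + 1) + 1 else 0 := by
  unfold pvRR
  have h : (N - j).toNat = (N - (j + 1)).toNat + 1 := by omega
  rw [h]; rfl

lemma pvDD_unfold (m : List (List Int)) (N i j : Int) (hi : i < N) :
    pvDD m N i j = if pvCell m i j = 1 then pvDD m N (i + 1) j + 1 else 0 := by
  unfold pvDD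
  have h : (N - i).toNat = (N - (i + 1)).toNat + 1 := by omega
  rw [h]; rfl

lemma pvRunR_nonneg (m : List (List Int)) (i : Int) : ∀ (k : Nat) (j : Int), 0 ≤ pvRunR m i k j := by
  intro k; induction k with
  | zero => intro j; simp [pvRunR]
  | succ n ih =>
    intro j
    simp only [pvRunR]
    split
    · have := ih (j + 1); omega
    · omega

lemma pvRunD_nonneg (m : List (List Int)) (j : Int) : ∀ (k : Nat) (i : Int), 0 ≤ pvRunD m j k i := by
  intro k; induction k with
  | zero => intro i; simp [pvRunD]
  | succ n ih =>
    intro i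
    simp only [pvRunD]
    split
    · have := ih (i + 1); omega
    · omega

lemma pvRR_all (m : List (List Int)) (N i : Int) :
    ∀ (n : Nat) (j : Int), j + n ≤ N →
      decide ((n : Int) ≤ pvRR m N i j) =
        (PySem.List.pyRange j (j + n) 1).all (fun t => pvCell m i t == 1) := by
  intro n; induction n with
  | zero =>
    intro j _
    rw [PySem.List.pyRange_one_eq_nil (by push_cast; omega)]
    simp [pvRR, pvRunR_nonneg]
  | succ k ih =>
    intro j h
    have hj : j < N := by push_cast at h; omega
    rw [pvRR_unfold m N i j hj]
    rw [PySem.List.pyRange_one_cons (by push_cast; omega)]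
    simp only [List.all_cons]
    by_cases hc : pvCell m i j = 1
    · have hrange : j + ((k + 1 : Nat) : Int) = (j + 1) + (k : Nat) := by push_cast; omega
      rw [if_pos hc, hrange, ← ih (j + 1) (by push_cast at h ⊢; omega), hc]
      simp only [BEq.rfl, Bool.true_and]
      rw [decide_eq_decide]
      push_cast; omega
    · rw [if_neg hc]
      have : (pvCell m i j == 1) = false := by simp [hc]
      rw [this]
      simp only [Bool.false_and]
      rw [decide_eq_false]
      push_cast; omega

lemma pvDD_all (m : List (List Int)) (N j : Int) :
    ∀ (n : Nat) (i : Int), i + n ≤ N →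
      decide ((n : Int) ≤ pvDD m N i j) =
        (PySem.List.pyRange i (i + n) 1).all (fun t => pvCell m t j == 1) := by
  intro n; induction n with
  | zero =>
    intro i _
    rw [PySem.List.pyRange_one_eq_nil (by push_cast; omega)]
    simp [pvDD, pvRunD_nonneg]
  | succ k ih =>
    intro i h
    have hi : i < N := by push_cast at h; omega
    rw [pvDD_unfold m N i j hi]
    rw [PySem.List.pyRange_one_cons (by push_cast; omega)]
    simp only [List.all_cons]
    by_cases hc : pvCell m i j = 1
    · have hrange : i + ((k + 1 : Nat) : Int) = (i + 1) + (k : Nat) := by push_cast; omega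
      rw [if_pos hc, hrange, ← ih (i + 1) (by push_cast at h ⊢; omega), hc]
      simp only [BEq.rfl, Bool.true_and]
      rw [decide_eq_decide]
      push_cast; omega
    · rw [if_neg hc]
      have : (pvCell m i j == 1) = false := by simp [hc]
      rw [this]
      simp only [Bool.false_and]
      rw [decide_eq_false]
      push_cast; omega

lemma pvSR_shift (m : List (List Int)) (N t u i j : Int) (h : ¬(i = t ∧ j = u)) :
    pvSR m N t (u - 1) i j = pvSR m N t u i j := by
  unfold pvSR; exact if_congr (by omega) rfl rfl

lemma pvSD_shift (m : List (List Int)) (N t u i j : Int) (h : ¬(i = t ∧ j = u)) :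
    pvSD m N t (u - 1) i j = pvSD m N t u i j := by
  unfold pvSD; exact if_congr (by omega) rfl rfl

lemma pvSR_self (m : List (List Int)) (N t u : Int) (ht0 : 0 ≤ t) (htN : t < N)
    (hu0 : 0 ≤ u) (huN : u < N) : pvSR m N t (u - 1) t u = pvRR m N t u := by
  unfold pvSR; rw [if_pos ⟨Or.inr ⟨rfl, by omega⟩, ht0, htN, hu0, huN⟩]

lemma pvSD_self (m : List (List Int)) (N t u : Int) (ht0 : 0 ≤ t) (htN : t < N)
    (hu0 : 0 ≤ u) (huN : u < N) : pvSD m N t (u - 1) t u = pvDD m N t u := by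
  unfold pvSD; rw [if_pos ⟨Or.inr ⟨rfl, by omega⟩, ht0, htN, hu0, huN⟩]

lemma pvSR_insert_val (m : List (List Int)) (N t u : Int) (ht0 : 0 ≤ t) (htN : t < N)
    (hu0 : 0 ≤ u) (huN : u < N) (hc : pvCell m t u = 1) :
    pvSR m N t u t (u + 1) + 1 = pvRR m N t u := by
  rw [pvRR_unfold m N t u huN, if_pos hc]
  unfold pvSR
  by_cases h : u + 1 < N
  · rw [if_pos ⟨Or.inr ⟨rfl, by omega⟩, ht0, htN, by omega, h⟩]
  · rw [if_neg (by omega)]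
    have : pvRR m N t (u + 1) = 0 := by
      unfold pvRR
      have h0 : (N - (u + 1)).toNat = 0 := by omega
      rw [h0]; rfl
    rw [this]

lemma pvSD_insert_val (m : List (List Int)) (N t u : Int) (ht0 : 0 ≤ t) (htN : t < N)
    (hu0 : 0 ≤ u) (huN : u < N) (hc : pvCell m t u = 1) :
    pvSD m N t u (t + 1) u + 1 = pvDD m N t u := by
  rw [pvDD_unfold m N t u htN, if_pos hc]
  unfold pvSD
  by_cases h : t + 1 < N
  · rw [if_pos ⟨Or.inl (by omega), by omega, h, hu0, huN⟩]
  · rw [if_neg (by omega)]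
    have : pvDD m N (t + 1) u = 0 := by
      unfold pvDD
      have h0 : (N - (t + 1)).toNat = 0 := by omega
      rw [h0]; rfl
    rw [this]

lemma pv_step_inv (m : List (List Int)) (N t u : Int) (ht0 : 0 ≤ t) (htN : t < N)
    (hu0 : 0 ≤ u) (huN : u < N)
    (rd : PySem.Dict (Int × Int) Int × PySem.Dict (Int × Int) Int)
    (hrd : pvInv m N t u rd) : pvInv m N t (u - 1) (pvTabStep m rd t u) := by
  intro i j
  unfold pvTabStep
  by_cases hc : pvCell m t u = 1
  · rw [if_pos hc]
    constructor
    · show (rd.1.insert (t, u) (rd.1.getD (t, u + 1) 0 + 1)).getD (i, j) 0 = _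
      rw [PySem.Dict.getD_insert, (hrd t (u + 1)).1,
        pvSR_insert_val m N t u ht0 htN hu0 huN hc]
      by_cases hij : (i, j) = ((t, u) : Int × Int)
      · rw [if_pos hij]
        have h1 : i = t := congrArg Prod.fst hij
        have h2 : j = u := congrArg Prod.snd hij
        rw [h1, h2, pvSR_self m N t u ht0 htN hu0 huN]
      · rw [if_neg hij, (hrd i j).1, pvSR_shift]
        intro ⟨h1, h2⟩; exact hij (by rw [h1, h2])
    · show (rd.2.insert (t, u) (rd.2.getD (t + 1, u) 0 + 1)).getD (i, j) 0 = _
      rw [PySem.Dict.getD_insert, (hrd (t + 1) u).2,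
        pvSD_insert_val m N t u ht0 htN hu0 huN hc]
      by_cases hij : (i, j) = ((t, u) : Int × Int)
      · rw [if_pos hij]
        have h1 : i = t := congrArg Prod.fst hij
        have h2 : j = u := congrArg Prod.snd hij
        rw [h1, h2, pvSD_self m N t u ht0 htN hu0 huN]
      · rw [if_neg hij, (hrd i j).2, pvSD_shift]
        intro ⟨h1, h2⟩; exact hij (by rw [h1, h2])
  · rw [if_neg hc]
    have hzR : pvRR m N t u = 0 := by rw [pvRR_unfold m N t u huN, if_neg hc]
    have hzD : pvDD m N t u = 0 := by rw [pvDD_unfold m N t u htN, if_neg hc]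
    by_cases hij : i = t ∧ j = u
    · obtain ⟨h1, h2⟩ := hij
      subst h1; subst h2
      constructor
      · rw [(hrd i j).1, pvSR_self m N i j ht0 htN hu0 huN, hzR]
        unfold pvSR; rw [if_neg (by omega)]
      · rw [(hrd i j).2, pvSD_self m N i j ht0 htN hu0 huN, hzD]
        unfold pvSD; rw [if_neg (by omega)]
    · rw [pvSR_shift m N t u i j hij, pvSD_shift m N t u i j hij]
      exact hrd i j

lemma pv_inner (m : List (List Int)) (N t : Int) (ht0 : 0 ≤ t) (htN : t < N) :
    ∀ (fu : Nat) (u : Int), u = (fu : Int) - 1 → u ≤ N - 1 →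
      ∀ rd, pvInv m N t u rd →
        pvInv m N t (-1)
          ((PySem.List.pyRange u (-1) (-1)).foldl (fun rd j => pvTabStep m rd t j) rd) := by
  intro fu
  induction fu with
  | zero =>
    intro u hu _ rd hrd
    have hu' : u = -1 := by omega
    subst hu'
    rw [show PySem.List.pyRange (-1) (-1) (-1) = [] from
      PySem.List.pyRange_neg_one_eq_nil (by omega)]
    exact hrd
  | succ k ih =>
    intro u hu huN rd hrd
    have hu0 : 0 ≤ u := by omega
    rw [show PySem.List.pyRange u (-1) (-1) = u :: PySem.List.pyRange (u - 1) (-1) (-1) from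
      PySem.List.pyRange_neg_one_cons (by omega)]
    rw [List.foldl_cons]
    exact ih (u - 1) (by omega) (by omega) _
      (pv_step_inv m N t u ht0 htN hu0 (by omega) rd hrd)

lemma pvSR_row_shift (m : List (List Int)) (N t i j : Int) :
    pvSR m N t (-1) i j = pvSR m N (t - 1) (N - 1) i j := by
  unfold pvSR; exact if_congr (by omega) rfl rfl

lemma pvSD_row_shift (m : List (List Int)) (N t i j : Int) :
    pvSD m N t (-1) i j = pvSD m N (t - 1) (N - 1) i j := by
  unfold pvSD; exact if_congr (by omega) rfl rfl

lemma pv_outer (m : List (List Int)) (N : Int) :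
    ∀ (fu : Nat) (t : Int), t = (fu : Int) - 1 → t ≤ N - 1 →
      ∀ rd, pvInv m N t (N - 1) rd →
        pvInv m N (-1) (N - 1)
          ((PySem.List.pyRange t (-1) (-1)).foldl (fun rd i =>
            (PySem.List.pyRange (N - 1) (-1) (-1)).foldl (fun rd j => pvTabStep m rd i j) rd) rd) := by
  intro fu
  induction fu with
  | zero =>
    intro t ht _ rd hrd
    have ht' : t = -1 := by omega
    subst ht'
    rw [show PySem.List.pyRange (-1) (-1) (-1) = [] from
      PySem.List.pyRange_neg_one_eq_nil (by omega)]
    exact hrd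
  | succ k ih =>
    intro t ht htN rd hrd
    have ht0 : 0 ≤ t := by omega
    rw [show PySem.List.pyRange t (-1) (-1) = t :: PySem.List.pyRange (t - 1) (-1) (-1) from
      PySem.List.pyRange_neg_one_cons (by omega)]
    rw [List.foldl_cons]
    apply ih (t - 1) (by omega) (by omega)
    have hrow := pv_inner m N t ht0 (by omega) (N - 1 + 1).toNat (N - 1) (by omega) (by omega) rd hrd
    intro i j
    rw [← pvSR_row_shift, ← pvSD_row_shift]
    exact hrow i j

lemma pv_tables (m : List (List Int)) (N : Int) (hN : 0 ≤ N) :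
    pvInv m N (-1) (N - 1) (pvTables m N) := by
  unfold pvTables
  apply pv_outer m N N.toNat (N - 1) (by omega) (by omega)
  intro i j
  constructor
  · show (PySem.Dict.empty : PySem.Dict (Int × Int) Int).getD (i, j) 0 = _
    rw [PySem.Dict.getD_empty]; unfold pvSR; rw [if_neg (by omega)]
  · show (PySem.Dict.empty : PySem.Dict (Int × Int) Int).getD (i, j) 0 = _
    rw [PySem.Dict.getD_empty]; unfold pvSD; rw [if_neg (by omega)]

lemma pv_all_and (l : List Int) (p q : Int → Bool) :
    (l.all fun x => p x && q x) = (l.all p && l.all q) := by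
  induction l with
  | nil => rfl
  | cons x xs ih => simp only [List.all_cons, ih]; cases p x <;> cases q x <;> simp

lemma pv_pred_eq (m : List (List Int)) (N i j s : Int)
    (hs : 1 ≤ s) (hsi : s ≤ N - i) (hsj : s ≤ N - j) :
    isOneBorder m i j s =
      (decide (s ≤ pvRR m N i j) && decide (s ≤ pvRR m N (i + s - 1) j) &&
       decide (s ≤ pvDD m N i j) && decide (s ≤ pvDD m N i (j + s - 1))) := by
  obtain ⟨n, hn⟩ : ∃ n : Nat, s = (n : Int) := ⟨s.toNat, by omega⟩
  subst hn
  unfold isOneBorder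
  rw [pv_all_and, pv_all_and]
  rw [← pvRR_all m N i n j (by omega), ← pvRR_all m N (i + n - 1) n j (by omega),
    ← pvDD_all m N j n i (by omega), ← pvDD_all m N (j + n - 1) n i (by omega)]
  cases decide ((n : Int) ≤ pvRR m N i j) <;>
    cases decide ((n : Int) ≤ pvRR m N (i + n - 1) j) <;>
      cases decide ((n : Int) ≤ pvDD m N i j) <;>
        cases decide ((n : Int) ≤ pvDD m N i (j + n - 1)) <;> rfl

lemma pvBreakMax_congr (p q : Int → Bool) :
    ∀ (l : List Int) (mb : Int), (∀ s ∈ l, p s = q s) →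
      pvBreakMax p mb l = pvBreakMax q mb l := by
  intro l
  induction l with
  | nil => intro mb _; rfl
  | cons x xs ih =>
    intro mb h
    simp only [pvBreakMax]
    rw [h x (List.mem_cons_self)]
    split
    · rfl
    · exact ih mb (fun s hs => h s (List.mem_cons_of_mem x hs))

-- ===== VERDICT (by name: the statement is the Claim_ definition above) =====
theorem MaxSide1_spec : Claim_equal_MaxSide1 := by
  unfold Claim_equal_MaxSide1
  intro matrix _ _
  unfold Spec_MaxSide1 MaxSide1 MaxSide1_alt
  by_cases hg : matrix.length = 0 ∨ matrix.length ≠ (matrix.headD []).length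
  · rw [if_pos hg, if_pos hg]
  · rw [if_neg hg, if_neg hg]
    have htab := pv_tables matrix (matrix.length : Int) (by positivity)
    apply PySem.List.foldl_congr_mem
    intro acc cow hcow
    apply PySem.List.foldl_congr_mem
    intro acc2 row hrow
    obtain ⟨hc0, hcN⟩ := (PySem.List.mem_pyRange_one).1 hcow
    obtain ⟨hr0, hrN⟩ := (PySem.List.mem_pyRange_one).1 hrow
    apply pvBreakMax_congr
    intro s hs
    obtain ⟨hs0, hsm⟩ := (PySem.List.mem_pyRange_neg_one).1 hs
    have hsi : s ≤ (matrix.length : Int) - cow := le_trans hsm (min_le_left _ _)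
    have hsj : s ≤ (matrix.length : Int) - row := le_trans hsm (min_le_right _ _)
    rw [pv_pred_eq matrix (matrix.length : Int) cow row s (by omega) hsi hsj]
    rw [(htab cow row).1, (htab (cow + s - 1) row).1,
      (htab cow row).2, (htab cow (row + s - 1)).2]
    unfold pvSR pvSD
    rw [if_pos (by omega), if_pos (by omega), if_pos (by omega), if_pos (by omega)]
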